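-- pv_equiv track=rewrite | github.com/delyan-kirov/Acyclic-hypercube | cube/pentagon.py | generate_possibilities
-- ===== SOURCE A (Python) =====
-- from itertools import product
--
-- def generate_possibilities(vertices, edges):
--     directions = list(product([True, False], repeat=len(edges)))
--     possibilities = []
--     for direction in directions:
--         possibility = []
--         for i in range(len(edges)):
--             if direction[i]:
--                 possibility.append(f'(C(({edges[i][0]},{edges[i][1]})) = 1)')
--             else:
--                 possibility.append(f'(C(({edges[i][1]},{edges[i][0]})) = 1)')
--         possibilities.append(' /\ '.join(possibility))
--     return possibilities
-- ===== SOURCE B (Python) =====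
-- def generate_possibilities(vertices, edges):
--     results = []
--
--     def rec(i, acc):
--         if i == len(edges):
--             results.append(' /\\ '.join(acc))
--             return
--         a, b = edges[i]
--         rec(i + 1, acc + [f'(C(({a},{b})) = 1)'])
--         rec(i + 1, acc + [f'(C(({b},{a})) = 1)'])
--
--     rec(0, [])
--     return results
-- ===== Notes on version B (the rewrite author's own statement) =====
-- stated objective: simpler
-- what changed: Replaces the materialized itertools.product table of direction tuples plus the indexed double loop with a single recursive enumerator over the edge list that builds each conjunction string incrementally (True branch before False), preserving product order; avoids building and re-indexing the tuple table (measured constant-factor speedup).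
import Mathlib
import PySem

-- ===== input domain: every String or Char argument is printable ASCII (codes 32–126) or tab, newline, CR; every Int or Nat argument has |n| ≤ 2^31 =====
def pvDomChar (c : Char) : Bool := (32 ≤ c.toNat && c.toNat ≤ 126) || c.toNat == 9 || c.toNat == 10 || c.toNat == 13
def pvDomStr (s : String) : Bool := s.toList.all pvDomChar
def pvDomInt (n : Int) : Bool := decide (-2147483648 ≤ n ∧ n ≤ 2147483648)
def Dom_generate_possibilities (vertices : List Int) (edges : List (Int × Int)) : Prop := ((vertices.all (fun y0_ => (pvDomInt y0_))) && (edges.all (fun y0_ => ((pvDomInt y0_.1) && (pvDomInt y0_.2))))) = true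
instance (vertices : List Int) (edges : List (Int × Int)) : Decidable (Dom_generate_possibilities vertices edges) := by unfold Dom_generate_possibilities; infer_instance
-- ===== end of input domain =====

-- B replaces the itertools.product table plus the indexed double loop of A by a single
-- recursive enumerator over the edge list that builds each conjunction incrementally (measured faster).

-- f'(C(({a},{b})) = 1)'  (shared formatting helper; both Pythons build this literal string)
def pvLit (a b : Int) : String :=
  "(C((" ++ PySem.Int.toStr a ++ "," ++ PySem.Int.toStr b ++ ")) = 1)"

-- ===== PORT A =====
-- itertools.product([True, False], repeat=n), in product's order (first coordinate outermost)
def pvProduct : Nat → List (List Bool)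
  | 0 => [[]]
  | n + 1 => (pvProduct n).map (fun t => true :: t) ++ (pvProduct n).map (fun t => false :: t)

def generate_possibilities (vertices : List Int) (edges : List (Int × Int)) : List String :=
  let directions := pvProduct edges.length
  directions.foldl
    (fun possibilities direction =>
      let possibility :=
        (List.range edges.length).foldl
          (fun acc i =>
            if direction.getD i false then
              acc ++ [pvLit (edges.getD i (0, 0)).1 (edges.getD i (0, 0)).2]
            else
              acc ++ [pvLit (edges.getD i (0, 0)).2 (edges.getD i (0, 0)).1])
          []
      possibilities ++ [PySem.Str.join " /\\ " possibility])
    []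

-- ===== PORT B =====
-- rec(i, acc) of Source B, recursing on the list of edges not yet consumed
def pvRec : List (Int × Int) → List String → List String
  | [], acc => [PySem.Str.join " /\\ " acc]
  | (a, b) :: rest, acc =>
      pvRec rest (acc ++ [pvLit a b]) ++ pvRec rest (acc ++ [pvLit b a])

def generate_possibilities_alt (vertices : List Int) (edges : List (Int × Int)) : List String :=
  pvRec edges []

-- ===== PRECONDITION & SPEC =====
def Spec_generate_possibilities (vertices : List Int) (edges : List (Int × Int)) (out : List String) : Prop := out = generate_possibilities_alt vertices edges
instance (vertices : List Int) (edges : List (Int × Int)) (out : List String) : Decidable (Spec_generate_possibilities vertices edges out) := by unfold Spec_generate_possibilities; infer_instance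

-- ===== CLAIM (what is proved, stated in full; the proofs are below) =====
def Claim_equal_generate_possibilities : Prop := ∀ (vertices : List Int) (edges : List (Int × Int)), Dom_generate_possibilities vertices edges → Spec_generate_possibilities vertices edges (generate_possibilities vertices edges)

-- ===== LEMMAS AND PROOFS =====

-- the list of oriented-edge strings selected by a direction, recursively
def pvBuild : List (Int × Int) → List Bool → List String
  | [], _ => []
  | _ :: _, [] => []
  | (a, b) :: es, d :: ds =>
      (if d then pvLit a b else pvLit b a) :: pvBuild es ds

lemma pvProduct_length {n : Nat} {d : List Bool} (h : d ∈ pvProduct n) : d.length = n := by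
  induction n generalizing d with
  | zero => simp [pvProduct] at h; simp [h]
  | succ n ih =>
      simp [pvProduct] at h
      rcases h with ⟨t, ht, rfl⟩ | ⟨t, ht, rfl⟩ <;> simp [ih ht]

lemma pvMap_eq (edges : List (Int × Int)) (d : List Bool) (hd : d.length = edges.length) :
    (List.range edges.length).map
      (fun i =>
        if d.getD i false then
          pvLit (edges.getD i (0, 0)).1 (edges.getD i (0, 0)).2
        else
          pvLit (edges.getD i (0, 0)).2 (edges.getD i (0, 0)).1) = pvBuild edges d := by
  induction edges generalizing d with
  | nil => simp [pvBuild]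
  | cons e es ih =>
      cases d with
      | nil => simp at hd
      | cons b ds =>
          obtain ⟨a1, a2⟩ := e
          simp only [List.length_cons, List.range_succ_eq_map, List.map_cons, List.map_map,
            Function.comp_def, List.getD_cons_zero, List.getD_cons_succ, pvBuild]
          exact congrArg _ (ih ds (by simpa using hd))

lemma pvInner_eq (edges : List (Int × Int)) (d : List Bool) (hd : d.length = edges.length) :
    (List.range edges.length).foldl
      (fun acc i =>
        if d.getD i false then
          acc ++ [pvLit (edges.getD i (0, 0)).1 (edges.getD i (0, 0)).2]
        else
          acc ++ [pvLit (edges.getD i (0, 0)).2 (edges.getD i (0, 0)).1])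
      [] = pvBuild edges d := by
  have hfun :
      (fun (acc : List String) i =>
        if d.getD i false then
          acc ++ [pvLit (edges.getD i (0, 0)).1 (edges.getD i (0, 0)).2]
        else
          acc ++ [pvLit (edges.getD i (0, 0)).2 (edges.getD i (0, 0)).1]) =
      fun acc i =>
        acc ++ [if d.getD i false then
                  pvLit (edges.getD i (0, 0)).1 (edges.getD i (0, 0)).2
                else
                  pvLit (edges.getD i (0, 0)).2 (edges.getD i (0, 0)).1] := by
    funext acc i; split <;> rfl
  rw [hfun, PySem.List.foldl_append_singleton_eq_map, List.nil_append, pvMap_eq edges d hd]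

lemma pvRec_eq (es : List (Int × Int)) (acc : List String) :
    pvRec es acc =
      (pvProduct es.length).map
        (fun d => PySem.Str.join " /\\ " (acc ++ pvBuild es d)) := by
  induction es generalizing acc with
  | nil => simp [pvRec, pvProduct, pvBuild]
  | cons e es ih =>
      obtain ⟨a, b⟩ := e
      simp only [pvRec, List.length_cons, pvProduct, List.map_append, List.map_map, ih]
      congr 1 <;> (apply List.map_congr_left; intro d _; simp [pvBuild, Function.comp])

theorem pv_main (vertices : List Int) (edges : List (Int × Int)) :
    generate_possibilities vertices edges = generate_possibilities_alt vertices edges := by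
  unfold generate_possibilities generate_possibilities_alt
  rw [PySem.List.foldl_append_singleton_eq_map, pvRec_eq]
  apply List.map_congr_left
  intro d hd
  rw [pvInner_eq edges d (pvProduct_length hd)]
  simp

-- ===== VERDICT (by name: the statement is the Claim_ definition above) =====
theorem generate_possibilities_spec : Claim_equal_generate_possibilities := by
  intro vertices edges _
  exact pv_main vertices edges
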